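-- pv_equiv track=rewrite | github.com/guiperlasca/Strukturis | ui/modern_main_window.py | _parse_page_list
-- ===== SOURCE A (Python) =====
-- def _parse_page_list(page_str, total_pages):
--     """Parse '1, 3, 5-8, 12' into list of ints."""
--     pages = set()
--     if not page_str.strip():
--         return []
--     try:
--         parts = page_str.split(',')
--         for part in parts:
--             part = part.strip()
--             if '-' in part:
--                 s, e = map(int, part.split('-'))
--                 pages.update(range(s, e + 1))
--             else:
--                 pages.add(int(part))
--         return sorted([p for p in pages if 1 <= p <= total_pages])
--     except Exception:
--         return []
-- ===== SOURCE B (Python) =====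
-- # Alternative: parse each comma token into a (lo, hi) interval, clamp the intervals to
-- # [1, total_pages], sort them by lower end and emit the pages in one merging sweep --
-- # no page set is materialised and no final sorted() pass is needed.
-- def _parse_token(part):
--     part = part.strip()
--     if '-' in part:
--         s, e = map(int, part.split('-'))
--         return (s, e)
--     p = int(part)
--     return (p, p)
--
--
-- def _parse_page_list(page_str, total_pages):
--     if not page_str.strip():
--         return []
--     try:
--         intervals = [_parse_token(part) for part in page_str.split(',')]
--     except Exception:
--         return []
--     clamped = [(max(lo, 1), min(hi, total_pages)) for lo, hi in intervals]
--     result = []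
--     cur = 1
--     for lo, hi in sorted(clamped, key=lambda iv: iv[0]):
--         lo = max(lo, cur)
--         if lo <= hi:
--             result.extend(range(lo, hi + 1))
--             cur = hi + 1
--     return result
-- ===== Notes on version B (the rewrite author's own statement) =====
-- stated objective: alternative
-- what changed: B parses each comma token into a (lo,hi) interval pair, clamps the intervals to [1,total_pages], sorts them by lower end and emits the pages in one merging sweep, instead of materialising every page of every range in a set and then filtering and sorting it.
import Mathlib
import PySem

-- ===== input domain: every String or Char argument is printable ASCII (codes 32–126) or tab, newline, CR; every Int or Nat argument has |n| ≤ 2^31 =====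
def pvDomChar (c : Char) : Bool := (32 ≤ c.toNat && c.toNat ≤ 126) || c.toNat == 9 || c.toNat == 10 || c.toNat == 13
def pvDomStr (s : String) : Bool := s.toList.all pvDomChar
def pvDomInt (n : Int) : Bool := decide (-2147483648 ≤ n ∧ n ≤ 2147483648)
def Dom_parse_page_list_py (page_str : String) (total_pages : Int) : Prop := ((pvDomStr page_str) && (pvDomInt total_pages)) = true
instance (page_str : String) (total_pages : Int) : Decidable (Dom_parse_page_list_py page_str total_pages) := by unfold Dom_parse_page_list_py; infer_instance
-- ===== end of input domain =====

-- B parses each comma token into a (lo,hi) interval, clamps the intervals to [1,total_pages],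
-- sorts them by lower end and emits the pages in one merging sweep, instead of
-- materialising every page in a set and then filtering and sorting it.


-- ===== PORT A =====
-- the for-loop over the comma-separated parts, accumulating the 'pages' set;
-- 'none' = an exception escaped the loop (caught by the try/except, which returns [])
def pvLoopA : List (List Char) → PySem.Set Int → Option (PySem.Set Int)
  | [], pages => some pages
  | part :: rest, pages =>
    let q := PySem.Chars.strip part
    if PySem.Chars.isIn ['-'] q then
      match PySem.Chars.splitOn q ['-'] with
      | [a, b] =>
        match PySem.Int.ofChars? a, PySem.Int.ofChars? b with
        | some s, some e => pvLoopA rest (PySem.Set.update pages (PySem.List.pyRange s (e + 1) 1))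
        | _, _ => none
      | _ => none  -- s, e = map(int, …) raises ValueError when there are not exactly two pieces
    else
      match PySem.Int.ofChars? q with
      | some p => pvLoopA rest (PySem.Set.add pages p)
      | none => none

def parse_page_list_py (page_str : String) (total_pages : Int) : List Int :=
  if PySem.Chars.strip page_str.toList = [] then []
  else
    match pvLoopA (PySem.Chars.splitOn page_str.toList [',']) PySem.Set.empty with
    | none => []
    | some pages =>
      PySem.List.sorted (pages.filter (fun p => decide (1 ≤ p) && decide (p ≤ total_pages)))
        (fun x => x) false

-- ===== PORT B =====
-- _parse_token: one comma token → its (lo, hi) interval; none = ValueError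
def pvParseToken? (part : List Char) : Option (Int × Int) :=
  let q := PySem.Chars.strip part
  if PySem.Chars.isIn ['-'] q then
    match PySem.Chars.splitOn q ['-'] with
    | [a, b] =>
      match PySem.Int.ofChars? a, PySem.Int.ofChars? b with
      | some s, some e => some (s, e)
      | _, _ => none
    | _ => none
  else
    match PySem.Int.ofChars? q with
    | some p => some (p, p)
    | none => none

-- the merging sweep over the clamped intervals, sorted by lower end
def pvSweep : List (Int × Int) → List Int → Int → List Int
  | [], result, _ => result
  | (lo, hi) :: rest, result, cur =>
    let lo' := max lo cur
    if lo' ≤ hi then pvSweep rest (result ++ PySem.List.pyRange lo' (hi + 1) 1) (hi + 1)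
    else pvSweep rest result cur

def parse_page_list_py_alt (page_str : String) (total_pages : Int) : List Int :=
  if PySem.Chars.strip page_str.toList = [] then []
  else
    match (PySem.Chars.splitOn page_str.toList [',']).mapM pvParseToken? with
    | none => []
    | some intervals =>
      let clamped := intervals.map (fun iv => (max iv.1 1, min iv.2 total_pages))
      pvSweep (PySem.List.sorted clamped (fun iv => iv.1) false) [] 1

-- ===== PRECONDITION & SPEC =====
def Spec_parse_page_list_py (page_str : String) (total_pages : Int) (out : List Int) : Prop := out = parse_page_list_py_alt page_str total_pages
instance (page_str : String) (total_pages : Int) (out : List Int) : Decidable (Spec_parse_page_list_py page_str total_pages out) := by unfold Spec_parse_page_list_py; infer_instance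

-- ===== CLAIM (what is proved, stated in full; the proofs are below) =====
def Claim_equal_parse_page_list_py : Prop := ∀ (page_str : String) (total_pages : Int), Dom_parse_page_list_py page_str total_pages → Spec_parse_page_list_py page_str total_pages (parse_page_list_py page_str total_pages)

-- ===== LEMMAS AND PROOFS =====

-- one loop iteration of A is: parse the token as B does, then fold its interval into the set
theorem pvLoopA_cons (part : List Char) (rest : List (List Char)) (pages : PySem.Set Int) :
    pvLoopA (part :: rest) pages =
      match pvParseToken? part with
      | none => none
      | some iv => pvLoopA rest (PySem.Set.update pages (PySem.List.pyRange iv.1 (iv.2 + 1) 1)) := by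
  show (let q := PySem.Chars.strip part; _) = _
  simp only [pvLoopA, pvParseToken?]
  cases h1 : PySem.Chars.isIn ['-'] (PySem.Chars.strip part) with
  | true =>
    rw [if_pos rfl, if_pos rfl]
    cases h2 : PySem.Chars.splitOn (PySem.Chars.strip part) ['-'] with
    | nil => rfl
    | cons a t =>
      cases t with
      | nil => rfl
      | cons b t2 =>
        cases t2 with
        | nil => cases ha : PySem.Int.ofChars? a <;> cases hb : PySem.Int.ofChars? b <;> simp [ha, hb]
        | cons c t3 => rfl
  | false =>
    rw [if_neg (by simp), if_neg (by simp)]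
    cases h2 : PySem.Int.ofChars? (PySem.Chars.strip part) with
    | none => rfl
    | some p =>
      have hr : PySem.List.pyRange p (p + 1) 1 = [p] := PySem.List.pyRange_one_singleton p
      simp [hr, PySem.Set.update_cons, PySem.Set.update_nil]

-- the loop of A and the token map of B fail together, and on success the set A built
-- holds exactly the integers covered by some interval B collected (relative to the state)
theorem pvLoopA_rel (parts : List (List Char)) :
    ∀ (pages : PySem.Set Int), pages.Nodup →
      (pvLoopA parts pages = none ↔ parts.mapM pvParseToken? = none) ∧
      (∀ S ivs, pvLoopA parts pages = some S → parts.mapM pvParseToken? = some ivs →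
        S.Nodup ∧ ∀ x : Int, x ∈ S ↔ x ∈ pages ∨ ∃ iv ∈ ivs, iv.1 ≤ x ∧ x ≤ iv.2) := by
  induction parts with
  | nil =>
    intro pages hnd
    refine ⟨by simp [pvLoopA], ?_⟩
    intro S ivs hS hI
    simp only [pvLoopA, Option.some.injEq] at hS
    simp only [List.mapM_nil, pure, Option.some.injEq] at hI
    subst hS; subst hI
    exact ⟨hnd, by simp⟩
  | cons part rest ih =>
    intro pages hnd
    rw [pvLoopA_cons, List.mapM_cons]
    cases hp : pvParseToken? part with
    | none => simp
    | some iv =>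
      have hnd' : (PySem.Set.update pages (PySem.List.pyRange iv.1 (iv.2 + 1) 1)).Nodup :=
        PySem.Set.nodup_update _ _ hnd
      obtain ⟨h1, h2⟩ := ih (PySem.Set.update pages (PySem.List.pyRange iv.1 (iv.2 + 1) 1)) hnd'
      refine ⟨?_, ?_⟩
      · rw [show (pvLoopA rest (PySem.Set.update pages (PySem.List.pyRange iv.1 (iv.2 + 1) 1)) = none) = (rest.mapM pvParseToken? = none) from propext h1]
        cases hrest : rest.mapM pvParseToken? <;> simp
      · intro S ivs hS hI
        cases hrest : rest.mapM pvParseToken? with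
        | none => rw [hrest] at hI; simp at hI
        | some tl =>
          rw [hrest] at hI
          simp only [Option.bind_eq_bind, Option.bind_some, Option.pure_def,
            Option.some.injEq] at hI
          obtain ⟨hSn, hSm⟩ := h2 S tl hS hrest
          subst hI
          refine ⟨hSn, fun x => ?_⟩
          rw [hSm x, PySem.Set.mem_update]
          simp only [PySem.List.mem_pyRange_one, List.mem_cons]
          constructor
          · rintro ((h | h) | h)
            · exact Or.inl h
            · exact Or.inr ⟨iv, Or.inl rfl, by omega⟩
            · obtain ⟨j, hj, hjx⟩ := h; exact Or.inr ⟨j, Or.inr hj, hjx⟩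
          · rintro (h | ⟨j, (rfl | hj), hjx⟩)
            · exact Or.inl (Or.inl h)
            · exact Or.inl (Or.inr (by omega))
            · exact Or.inr ⟨j, hj, hjx⟩

-- ===== VERDICT (by name: the statement is the Claim_ definition above) =====
-- the sweep emits, in increasing order, exactly the integers its pending intervals cover
theorem pvSweep_spec : ∀ (l : List (Int × Int)) (result : List Int) (cur : Int),
    result.Pairwise (· < ·) →
    (∀ x ∈ result, x < cur) →
    l.Pairwise (fun a b => a.1 ≤ b.1) →
    (∀ iv ∈ l, ∀ x : Int, iv.1 ≤ x → x ≤ iv.2 → x < cur → x ∈ result) →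
    (pvSweep l result cur).Pairwise (· < ·) ∧
      (∀ x : Int, x ∈ pvSweep l result cur ↔ x ∈ result ∨ ∃ iv ∈ l, iv.1 ≤ x ∧ x ≤ iv.2) := by
  intro l
  induction l with
  | nil =>
    intro result cur h1 _ _ _
    exact ⟨h1, by simp [pvSweep]⟩
  | cons head rest ih =>
    intro result cur h1 h2 h3 h4
    obtain ⟨lo, hi⟩ := head
    have h3rest := (List.pairwise_cons.mp h3).2
    have h3head := (List.pairwise_cons.mp h3).1
    show (pvSweep ((lo, hi) :: rest) result cur).Pairwise (· < ·) ∧ _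
    rw [show pvSweep ((lo, hi) :: rest) result cur =
        (if max lo cur ≤ hi then
          pvSweep rest (result ++ PySem.List.pyRange (max lo cur) (hi + 1) 1) (hi + 1)
        else pvSweep rest result cur) from rfl]
    by_cases hle : max lo cur ≤ hi
    · rw [if_pos hle]
      have hpw : (result ++ PySem.List.pyRange (max lo cur) (hi + 1) 1).Pairwise (· < ·) := by
        rw [List.pairwise_append]
        refine ⟨h1, PySem.List.pairwise_lt_pyRange_one _ _, ?_⟩
        intro a ha b hb
        have := h2 a ha
        have := (PySem.List.mem_pyRange_one.mp hb).1
        omega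
      have hlt : ∀ x ∈ result ++ PySem.List.pyRange (max lo cur) (hi + 1) 1, x < hi + 1 := by
        intro x hx
        rcases List.mem_append.mp hx with hx | hx
        · have := h2 x hx; omega
        · exact (PySem.List.mem_pyRange_one.mp hx).2
      have hcov : ∀ iv ∈ rest, ∀ x : Int, iv.1 ≤ x → x ≤ iv.2 → x < hi + 1 →
          x ∈ result ++ PySem.List.pyRange (max lo cur) (hi + 1) 1 := by
        intro iv hiv x hx1 hx2 hx3
        by_cases hxc : x < cur
        · exact List.mem_append.mpr (Or.inl (h4 iv (List.mem_cons_of_mem _ hiv) x hx1 hx2 hxc))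
        · refine List.mem_append.mpr (Or.inr (PySem.List.mem_pyRange_one.mpr ⟨?_, by omega⟩))
          have := h3head iv hiv
          omega
      obtain ⟨p1, p2⟩ := ih _ _ hpw hlt h3rest hcov
      refine ⟨p1, fun x => ?_⟩
      rw [p2 x]
      simp only [List.mem_append, PySem.List.mem_pyRange_one, List.mem_cons]
      constructor
      · rintro ((h | h) | ⟨iv, hiv, hx⟩)
        · exact Or.inl h
        · exact Or.inr ⟨(lo, hi), Or.inl rfl, by constructor <;> omega⟩
        · exact Or.inr ⟨iv, Or.inr hiv, hx⟩
      · rintro (h | ⟨iv, (rfl | hiv), hx1, hx2⟩)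
        · exact Or.inl (Or.inl h)
        · simp only at hx1 hx2
          by_cases hxc : x < cur
          · exact Or.inl (Or.inl (h4 (lo, hi) List.mem_cons_self x hx1 hx2 hxc))
          · exact Or.inl (Or.inr (by omega))
        · exact Or.inr ⟨iv, hiv, hx1, hx2⟩
    · rw [if_neg hle]
      have hcov : ∀ iv ∈ rest, ∀ x : Int, iv.1 ≤ x → x ≤ iv.2 → x < cur → x ∈ result :=
        fun iv hiv => h4 iv (List.mem_cons_of_mem _ hiv)
      obtain ⟨p1, p2⟩ := ih _ _ h1 h2 h3rest hcov
      refine ⟨p1, fun x => ?_⟩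
      rw [p2 x]
      simp only [List.mem_cons]
      constructor
      · rintro (h | ⟨iv, hiv, hx⟩)
        · exact Or.inl h
        · exact Or.inr ⟨iv, Or.inr hiv, hx⟩
      · rintro (h | ⟨iv, (rfl | hiv), hx1, hx2⟩)
        · exact Or.inl h
        · exact Or.inl (h4 (lo, hi) List.mem_cons_self x hx1 hx2 (by omega))
        · exact Or.inr ⟨iv, hiv, hx1, hx2⟩

theorem parse_page_list_py_spec : Claim_equal_parse_page_list_py := by
  unfold Claim_equal_parse_page_list_py
  intro ps n _
  unfold Spec_parse_page_list_py parse_page_list_py parse_page_list_py_alt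
  by_cases hb : PySem.Chars.strip ps.toList = []
  · rw [if_pos hb, if_pos hb]
  · rw [if_neg hb, if_neg hb]
    obtain ⟨h1, h2⟩ := pvLoopA_rel (PySem.Chars.splitOn ps.toList [',']) PySem.Set.empty List.nodup_nil
    cases hA : pvLoopA (PySem.Chars.splitOn ps.toList [',']) PySem.Set.empty with
    | none => rw [h1.mp hA]
    | some S =>
      cases hB : (PySem.Chars.splitOn ps.toList [',']).mapM pvParseToken? with
      | none => exact absurd (hA.symm.trans (h1.mpr hB)) (by simp)
      | some ivs =>
        obtain ⟨hSn, hSm⟩ := h2 S ivs hA hB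
        obtain ⟨q1, q2⟩ := pvSweep_spec
          (PySem.List.sorted (ivs.map (fun iv => (max iv.1 1, min iv.2 n))) (fun iv => iv.1) false)
          [] 1 List.Pairwise.nil (by simp)
          (PySem.List.sorted_pairwise _ _)
          (by
            intro iv hiv x hx1 hx2 hxc
            have := (PySem.List.mem_sorted _ _ _ _).mp hiv
            obtain ⟨jv, _, rfl⟩ := List.mem_map.mp this
            simp only at hx1
            omega)
        apply PySem.List.sorted_eq_of_perm_of_pairwise_lt
        · rw [List.perm_ext_iff_of_nodup (List.Pairwise.imp (fun h => ne_of_lt h) q1) (hSn.filter _)]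
          intro x
          rw [q2 x, List.mem_filter]
          simp only [List.not_mem_nil, false_or, Bool.and_eq_true, decide_eq_true_eq]
          rw [hSm x]
          simp only [PySem.Set.empty, List.not_mem_nil, false_or, PySem.List.mem_sorted,
            List.mem_map]
          constructor
          · rintro ⟨civ, ⟨jv, hjv, rfl⟩, hx1, hx2⟩
            simp only at hx1 hx2
            exact ⟨⟨jv, hjv, by omega⟩, by omega, by omega⟩
          · rintro ⟨⟨jv, hjv, hx1, hx2⟩, hb1, hb2⟩
            exact ⟨(max jv.1 1, min jv.2 n), ⟨jv, hjv, rfl⟩, by simp; omega⟩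
        · exact q1
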